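-- pv_equiv track=rewrite | github.com/pinosante/VAM-Evolutionary-Character-Creation | VAM Evolutionary Character Creation.py | strip_dir_string_to_max_length
-- ===== SOURCE A (Python) =====
-- def strip_dir_string_to_max_length(dirstring, length):
--     """ Takes a string directory, and cuts it at the '/' in the string such that the
--         length of the stripped string is as large as possible but stays smaller than
--         the total 'length'. A '(…)/' is added if the string had to be cut.
--
--         Example:
--         strip_dir_string_to_max_length("C:/456/890/234.txt", 99)
--         >C:/456/890/234.txt
--         strip_dir_string_to_max_length("C:/456/890/234.txt", 15)
--         >(…)/890/234.txt
--         strip_dir_string_to_max_length("C:/456/890/234.txt", 14)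
--         >(…)/234.txt
--         """
--     if len(dirstring) <= length:
--         return dirstring
--     parts = dirstring.split("/")
--     stripped_string = ""
--     index = len(parts) - 1
--     while (len(parts[index]) + 1) <= ( (length - 4) - (len(stripped_string) - 1)):
--         if index == -1:
--             break
--         stripped_string =  parts[index] + "/" + stripped_string
--         index -= 1
--     stripped_string = stripped_string[:-1] # remove trailing "/"
--     return "(…)/" + stripped_string
-- ===== SOURCE B (Python) =====
-- def strip_dir_string_to_max_length(dirstring, length):
--     if len(dirstring) <= length:
--         return dirstring
--     parts = dirstring.split("/")
--     best = ""
--     for i in range(len(parts) - 1, -1, -1):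
--         candidate = "/".join(parts[i:])
--         if len(candidate) + 4 > length:
--             break
--         best = candidate
--     return "(…)/" + best
-- ===== Notes on version B (the rewrite author's own statement) =====
-- stated objective: simpler
-- what changed: Replaces the while-loop that prepends parts into an accumulator string under the opaque budget arithmetic (length-4)-(len(s)-1) and then strips a trailing slash, by a countdown over suffix starts that keeps the longest '/'.join(parts[i:]) candidate fitting len(candidate)+4 <= length.
import Mathlib
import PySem

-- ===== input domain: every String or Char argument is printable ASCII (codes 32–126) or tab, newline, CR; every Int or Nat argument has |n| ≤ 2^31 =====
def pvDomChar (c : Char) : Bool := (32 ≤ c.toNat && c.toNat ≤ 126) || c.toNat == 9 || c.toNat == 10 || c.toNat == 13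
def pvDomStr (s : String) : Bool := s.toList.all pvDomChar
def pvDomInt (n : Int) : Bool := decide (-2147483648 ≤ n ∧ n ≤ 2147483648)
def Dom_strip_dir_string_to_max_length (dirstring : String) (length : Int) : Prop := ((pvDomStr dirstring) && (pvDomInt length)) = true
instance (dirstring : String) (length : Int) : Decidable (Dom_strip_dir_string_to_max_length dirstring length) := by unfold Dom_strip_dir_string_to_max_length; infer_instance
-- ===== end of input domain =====

-- B replaces A's prepend-with-budget-arithmetic loop (and its trailing-slash strip) by keeping
-- the longest '/'-joined suffix candidate with len(candidate) + 4 <= length: simpler to read.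

-- ===== PORT A =====
-- A's while loop; fuel n = index + 1 (n = 0 ⟺ index = -1, where the Python while-condition
-- reads parts[-1] and then `break`s if it held, so stripped_string is returned either way).
def pvLoopA (parts : List (List Char)) (length : Int) : Nat → List Char → List Char
  | 0, stripped => stripped
  | n+1, stripped =>
      if ((parts.getD n []).length : Int) + 1 ≤ (length - 4) - ((stripped.length : Int) - 1) then
        pvLoopA parts length n (parts.getD n [] ++ ['/'] ++ stripped)
      else stripped

def strip_dir_string_to_max_length (dirstring : String) (length : Int) : String :=
  if PySem.Str.len dirstring ≤ length then dirstring
  else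
    let parts := PySem.Chars.splitOn dirstring.toList ['/']
    let stripped := pvLoopA parts length parts.length []
    -- stripped_string[:-1] removes the trailing "/"
    String.ofList ("(…)/".toList ++ PySem.List.slice stripped none (some (-1)))

-- ===== PORT B =====
-- B's for-loop over i from len(parts)-1 down to 0 with break; fuel n = i + 1.
def pvLoopB (parts : List (List Char)) (length : Int) : Nat → List Char → List Char
  | 0, best => best
  | n+1, best =>
      let candidate := PySem.Chars.join ['/'] (PySem.List.slice parts (some (n : Int)) none)
      if (candidate.length : Int) + 4 > length then best
      else pvLoopB parts length n candidate

def strip_dir_string_to_max_length_alt (dirstring : String) (length : Int) : String :=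
  if PySem.Str.len dirstring ≤ length then dirstring
  else
    let parts := PySem.Chars.splitOn dirstring.toList ['/']
    String.ofList ("(…)/".toList ++ pvLoopB parts length parts.length [])

-- ===== PRECONDITION & SPEC =====
def Spec_strip_dir_string_to_max_length (dirstring : String) (length : Int) (out : String) : Prop := out = strip_dir_string_to_max_length_alt dirstring length
instance (dirstring : String) (length : Int) (out : String) : Decidable (Spec_strip_dir_string_to_max_length dirstring length out) := by unfold Spec_strip_dir_string_to_max_length; infer_instance

-- ===== CLAIM (what is proved, stated in full; the proofs are below) =====
def Claim_equal_strip_dir_string_to_max_length : Prop := ∀ (dirstring : String) (length : Int), Dom_strip_dir_string_to_max_length dirstring length → Spec_strip_dir_string_to_max_length dirstring length (strip_dir_string_to_max_length dirstring length)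

-- ===== LEMMAS AND PROOFS =====

-- the joined suffix '/'.join(parts[n:])
def pvJ (parts : List (List Char)) (n : Nat) : List Char :=
  PySem.Chars.join ['/'] (parts.drop n)

-- A's accumulator state when the loop is about to consider index n-1
def pvS (parts : List (List Char)) (n : Nat) : List Char :=
  if n = parts.length then [] else pvJ parts n ++ ['/']

-- B's best candidate when the loop is about to consider i = n-1
def pvBst (parts : List (List Char)) (n : Nat) : List Char :=
  if n = parts.length then [] else pvJ parts n

lemma pvSplitOn_go_ne_nil (sep : List Char) :
    ∀ (fuel : Nat) (l cur : List Char) (acc : List (List Char)),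
      PySem.Chars.splitOn.go sep fuel l cur acc ≠ [] := by
  intro fuel
  induction fuel with
  | zero => intro l cur acc; simp [PySem.Chars.splitOn.go]
  | succ fuel ih =>
      intro l cur acc
      cases l with
      | nil => simp [PySem.Chars.splitOn.go]
      | cons c rest =>
          simp only [PySem.Chars.splitOn.go]
          split
          · exact ih _ _ _
          · exact ih _ _ _

lemma pvSplitOn_ne_nil (s sep : List Char) : PySem.Chars.splitOn s sep ≠ [] := by
  unfold PySem.Chars.splitOn
  exact pvSplitOn_go_ne_nil sep _ _ _ _

-- '/'.join(parts[n:]) decomposed at its first part, for n < len(parts)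
lemma pvJ_cons (parts : List (List Char)) (n : Nat) (hn : n < parts.length) :
    pvJ parts n =
      parts.getD n [] ++ (if n + 1 = parts.length then [] else '/' :: pvJ parts (n+1)) := by
  have hdrop : parts.drop n = parts[n] :: parts.drop (n+1) := List.drop_eq_getElem_cons hn
  have hget : parts.getD n [] = parts[n] := List.getD_eq_getElem parts [] hn
  by_cases h : n + 1 = parts.length
  · have : parts.drop (n+1) = [] := by
      apply List.drop_eq_nil_of_le; omega
    simp [pvJ, hdrop, PySem.Chars.join_singleton, h, List.getElem?_eq_getElem hn]
  · have hlt : n + 1 < parts.length := by omega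
    have hdrop2 : parts.drop (n+1) = parts[n+1] :: parts.drop (n+2) :=
      List.drop_eq_getElem_cons hlt
    simp only [pvJ, hdrop, hdrop2, PySem.Chars.join_cons_cons, hget, h, if_false]
    simp

-- the loop invariant: from state n, A's result with the trailing '/' stripped is B's result
lemma pvLoop_agree (parts : List (List Char)) (length : Int) :
    ∀ n : Nat, n ≤ parts.length → parts ≠ [] →
      (pvLoopA parts length n (pvS parts n)).dropLast = pvLoopB parts length n (pvBst parts n) := by
  intro n
  induction n with
  | zero =>
      intro _ hne
      have h0 : (0 : Nat) ≠ parts.length := by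
        intro h; exact hne (List.eq_nil_of_length_eq_zero h.symm)
      simp [pvLoopA, pvLoopB, pvS, pvBst, h0]
  | succ n ih =>
      intro hle hne
      have hn : n < parts.length := by omega
      have hslice : PySem.List.slice parts (some (n : Int)) none = parts.drop n :=
        PySem.List.slice_from_natCast parts n
      have hcand : PySem.Chars.join ['/'] (PySem.List.slice parts (some (n : Int)) none) = pvJ parts n := by
        rw [hslice]; rfl
      -- length bookkeeping
      have hJ := pvJ_cons parts n hn
      have hJlen : (pvJ parts n).length =
          (parts.getD n []).length + (if n + 1 = parts.length then 0 else 1 + (pvJ parts (n+1)).length) := by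
        rw [hJ]; by_cases h : n + 1 = parts.length <;> simp [h] <;> omega
      have hSlen : (pvS parts (n+1)).length =
          (if n + 1 = parts.length then 0 else (pvJ parts (n+1)).length + 1) := by
        unfold pvS; by_cases h : n + 1 = parts.length <;> simp [h]
      -- the two loop conditions are equivalent
      have hcond : (((parts.getD n []).length : Int) + 1 ≤ (length - 4) - (((pvS parts (n+1)).length : Int) - 1))
          ↔ ¬ (((pvJ parts n).length : Int) + 4 > length) := by
        rw [hSlen, hJlen]
        by_cases h : n + 1 = parts.length <;> simp [h] <;> omega
      simp only [pvLoopA, pvLoopB, hcand]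
      by_cases hc : ((parts.getD n []).length : Int) + 1 ≤ (length - 4) - (((pvS parts (n+1)).length : Int) - 1)
      · -- both loops continue
        have hc' : ¬ (((pvJ parts n).length : Int) + 4 > length) := hcond.mp hc
        rw [if_pos hc, if_neg hc']
        have hS' : parts.getD n [] ++ ['/'] ++ pvS parts (n+1) = pvS parts n := by
          have hne' : n ≠ parts.length := by omega
          unfold pvS
          rw [hJ]
          by_cases h : n + 1 = parts.length <;> simp [h, hne']
        have hB' : pvJ parts n = pvBst parts n := by
          unfold pvBst
          have hne' : n ≠ parts.length := by omega
          simp [hne']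
        rw [hS', hB']
        exact ih (by omega) hne
      · -- both loops stop; strip the trailing slash of A's state
        have hc' : (((pvJ parts n).length : Int) + 4 > length) := by
          by_contra h; exact hc (hcond.mpr h)
        rw [if_neg hc, if_pos hc']
        unfold pvS pvBst
        by_cases h : n + 1 = parts.length <;> simp [h]

-- ===== VERDICT (by name: the statement is the Claim_ definition above) =====
theorem strip_dir_string_to_max_length_spec : Claim_equal_strip_dir_string_to_max_length := by
  intro dirstring length _
  unfold Spec_strip_dir_string_to_max_length
  unfold strip_dir_string_to_max_length strip_dir_string_to_max_length_alt
  by_cases hg : PySem.Str.len dirstring ≤ length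
  · rw [if_pos hg, if_pos hg]
  · rw [if_neg hg, if_neg hg]
    have hne : PySem.Chars.splitOn dirstring.toList ['/'] ≠ [] :=
      pvSplitOn_ne_nil dirstring.toList ['/']
    have hmain := pvLoop_agree (PySem.Chars.splitOn dirstring.toList ['/']) length
      (PySem.Chars.splitOn dirstring.toList ['/']).length (le_refl _) hne
    have hS : pvS (PySem.Chars.splitOn dirstring.toList ['/'])
        (PySem.Chars.splitOn dirstring.toList ['/']).length = [] := by simp [pvS]
    have hB : pvBst (PySem.Chars.splitOn dirstring.toList ['/'])
        (PySem.Chars.splitOn dirstring.toList ['/']).length = [] := by simp [pvBst]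
    rw [hS, hB] at hmain
    simp only [PySem.List.slice_to_neg_one, hmain]
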